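-- pv_equiv track=rewrite | github.com/CHE10X/acme-ops | bonfire/dashboard/app/lib/transformers.py | _status_messages
-- ===== SOURCE A (Python) =====
-- from typing import Any, Dict, List, Sequence, Tuple
--
-- def _status_messages(token_error: str | None, health_error: str | None, economy_error: str | None, alert_error: str | None) -> List[str]:
--     messages = []
--     if token_error == "missing":
--         messages.append("no telemetry available")
--     if alert_error == "missing":
--         messages.append("source file unavailable")
--     if health_error == "missing":
--         messages.append("source file unavailable")
--     if economy_error == "missing":
--         messages.append("source file unavailable")
--     if not messages:
--         return messages
--     seen = set()
--     deduped: List[str] = []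
--     for message in messages:
--         if message in seen:
--             continue
--         seen.add(message)
--         deduped.append(message)
--     return deduped
-- ===== SOURCE B (Python) =====
-- def _status_messages(token_error, health_error, economy_error, alert_error):
--     messages = []
--     if token_error == "missing":
--         messages.append("no telemetry available")
--     if "missing" in (alert_error, health_error, economy_error):
--         messages.append("source file unavailable")
--     return messages
-- ===== Notes on version B (the rewrite author's own statement) =====
-- stated objective: simpler
-- what changed: B builds each distinct message directly (one membership test over the three file flags) instead of appending up to three duplicates and running a seen-set dedup loop.
import Mathlib
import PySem

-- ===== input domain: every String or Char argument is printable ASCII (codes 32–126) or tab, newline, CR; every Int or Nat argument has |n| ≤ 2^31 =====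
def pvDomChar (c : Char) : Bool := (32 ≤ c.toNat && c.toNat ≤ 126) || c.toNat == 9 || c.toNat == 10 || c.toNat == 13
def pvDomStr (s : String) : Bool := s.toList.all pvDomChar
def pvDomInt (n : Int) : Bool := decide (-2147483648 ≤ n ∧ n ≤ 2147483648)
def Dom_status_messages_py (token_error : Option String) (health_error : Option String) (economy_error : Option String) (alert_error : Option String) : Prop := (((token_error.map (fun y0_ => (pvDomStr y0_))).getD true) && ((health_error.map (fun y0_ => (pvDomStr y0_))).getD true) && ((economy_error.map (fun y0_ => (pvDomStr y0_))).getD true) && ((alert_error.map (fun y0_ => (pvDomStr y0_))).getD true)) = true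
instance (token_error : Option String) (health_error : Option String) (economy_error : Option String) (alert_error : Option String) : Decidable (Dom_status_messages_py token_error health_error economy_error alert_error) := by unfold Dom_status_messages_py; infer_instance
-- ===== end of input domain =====

-- B builds each distinct status message directly (simpler: no duplicate appends, no dedup loop); return value proved equal to A's on all inputs.


-- ===== PORT A =====
def pvDedupLoop (msgs : List String) (seen : PySem.Set String) (deduped : List String) : List String :=
  match msgs with
  | [] => deduped
  | m :: rest =>
    if PySem.Set.contains seen m then pvDedupLoop rest seen deduped
    else pvDedupLoop rest (PySem.Set.add seen m) (deduped ++ [m])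

def status_messages_py (token_error : Option String) (health_error : Option String) (economy_error : Option String) (alert_error : Option String) : List String :=
  let messages :=
    (if token_error = some "missing" then ["no telemetry available"] else []) ++
    (if alert_error = some "missing" then ["source file unavailable"] else []) ++
    (if health_error = some "missing" then ["source file unavailable"] else []) ++
    (if economy_error = some "missing" then ["source file unavailable"] else [])
  if messages = [] then messages
  else pvDedupLoop messages PySem.Set.empty []

-- ===== PORT B =====
def status_messages_py_alt (token_error : Option String) (health_error : Option String) (economy_error : Option String) (alert_error : Option String) : List String :=
  (if token_error = some "missing" then ["no telemetry available"] else []) ++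
  -- '"missing" in (alert_error, health_error, economy_error)' written as the disjunction
  (if alert_error = some "missing" ∨ health_error = some "missing" ∨ economy_error = some "missing"
   then ["source file unavailable"] else [])

-- ===== PRECONDITION & SPEC =====
def Spec_status_messages_py (token_error : Option String) (health_error : Option String) (economy_error : Option String) (alert_error : Option String) (out : List String) : Prop := out = status_messages_py_alt token_error health_error economy_error alert_error
instance (token_error : Option String) (health_error : Option String) (economy_error : Option String) (alert_error : Option String) (out : List String) : Decidable (Spec_status_messages_py token_error health_error economy_error alert_error out) := by unfold Spec_status_messages_py; infer_instance

-- ===== CLAIM (what is proved, stated in full; the proofs are below) =====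
def Claim_equal_status_messages_py : Prop := ∀ (token_error : Option String) (health_error : Option String) (economy_error : Option String) (alert_error : Option String), Dom_status_messages_py token_error health_error economy_error alert_error → Spec_status_messages_py token_error health_error economy_error alert_error (status_messages_py token_error health_error economy_error alert_error)

-- ===== LEMMAS AND PROOFS =====

-- ===== VERDICT (by name: the statement is the Claim_ definition above) =====
theorem status_messages_py_spec : Claim_equal_status_messages_py := by
  intro t h e a _
  unfold Spec_status_messages_py
  by_cases ht : t = some "missing" <;>
    by_cases ha : a = some "missing" <;>
      by_cases hh : h = some "missing" <;>
        by_cases he : e = some "missing" <;>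
          simp [status_messages_py, status_messages_py_alt, pvDedupLoop,
                PySem.Set.contains, PySem.Set.add, PySem.Set.empty, ht, ha, hh, he]
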